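-- pv_equiv track=rewrite | github.com/cjuniordev/programming-functional | EPs/EP2/2021101100.py | jogouPonta
-- ===== SOURCE A (Python) =====
-- def jogouPonta(tabuleiro, jogou=False, pontas=[1, 3, 7, 9], i=0):
--     """
--     Verifica se alguem jogou nas pontas
--     """
--     if i < len(tabuleiro):
--         if tabuleiro[i] != ' ':
--             if i in pontas:
--                 return jogouPonta(tabuleiro, True, pontas, i+1)
--             else:
--                 return jogouPonta(tabuleiro, jogou, pontas, i+1)
--         else:
--             return jogouPonta(tabuleiro, jogou, pontas, i+1)
--     else:
--         return jogou
-- ===== SOURCE B (Python) =====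
-- def jogouPonta(tabuleiro, jogou=False, pontas=[1, 3, 7, 9], i=0):
--     """
--     Verifica se alguem jogou nas pontas
--     """
--     for j in range(i, len(tabuleiro)):
--         if tabuleiro[j] != ' ' and j in pontas:
--             jogou = True
--     return jogou
-- ===== Notes on version B (the rewrite author's own statement) =====
-- stated objective: simpler
-- what changed: Replaces the tail recursion (one call per cell, threading the flag through the arguments) with a single explicit for-loop over range(i, len(tabuleiro)) that sets the flag in place and returns it once.
import Mathlib
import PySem

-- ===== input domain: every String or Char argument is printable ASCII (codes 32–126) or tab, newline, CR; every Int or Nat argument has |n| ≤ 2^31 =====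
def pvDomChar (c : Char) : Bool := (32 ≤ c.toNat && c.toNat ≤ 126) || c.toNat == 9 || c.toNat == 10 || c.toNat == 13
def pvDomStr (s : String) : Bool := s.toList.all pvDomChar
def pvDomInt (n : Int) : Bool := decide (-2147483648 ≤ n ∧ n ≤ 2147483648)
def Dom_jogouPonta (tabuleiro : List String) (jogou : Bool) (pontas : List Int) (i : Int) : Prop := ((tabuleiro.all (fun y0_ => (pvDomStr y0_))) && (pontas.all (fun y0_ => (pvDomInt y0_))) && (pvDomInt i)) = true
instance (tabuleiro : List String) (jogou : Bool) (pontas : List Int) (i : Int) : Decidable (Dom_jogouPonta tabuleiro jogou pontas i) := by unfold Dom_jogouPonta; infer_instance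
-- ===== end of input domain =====

-- B replaces A's tail recursion by a single explicit loop over the remaining indices; same O(n) cost, no recursion.

-- ===== PORT A =====
def jogouPonta (tabuleiro : List String) (jogou : Bool) (pontas : List Int) (i : Int) : Bool :=
  if _h : i < (tabuleiro.length : Int) then
    match PySem.List.pyGet? tabuleiro i with
    | none => jogou   -- Python raises IndexError here; excluded by Pre_jogouPonta
    | some c =>
      if c != " " then
        if pontas.contains i then jogouPonta tabuleiro true pontas (i+1)
        else jogouPonta tabuleiro jogou pontas (i+1)
      else jogouPonta tabuleiro jogou pontas (i+1)
  else jogou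
termination_by ((tabuleiro.length : Int) - i).toNat
decreasing_by all_goals omega

-- ===== PORT B =====
def jogouPonta_alt (tabuleiro : List String) (jogou : Bool) (pontas : List Int) (i : Int) : Bool :=
  (PySem.List.pyRange i (tabuleiro.length : Int) 1).foldl
    (fun acc j =>
      match PySem.List.pyGet? tabuleiro j with
      | none => acc   -- Python raises IndexError here; excluded by Pre_jogouPonta
      | some c => if c != " " && pontas.contains j then true else acc)
    jogou

-- ===== PRECONDITION & SPEC =====
-- Pre_ excludes exactly the inputs where both Pythons raise IndexError: a start index i below -len(tabuleiro) (negative wraparound out of range).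
def Pre_jogouPonta (tabuleiro : List String) (jogou : Bool) (pontas : List Int) (i : Int) : Prop :=
  -(tabuleiro.length : Int) ≤ i
instance (tabuleiro : List String) (jogou : Bool) (pontas : List Int) (i : Int) : Decidable (Pre_jogouPonta tabuleiro jogou pontas i) := by unfold Pre_jogouPonta; infer_instance
def pvWitness_jogouPonta : List String × Bool × List Int × Int := (["X", " ", "O"], false, [1, 3, 7, 9], 0)

def Spec_jogouPonta (tabuleiro : List String) (jogou : Bool) (pontas : List Int) (i : Int) (out : Bool) : Prop := out = jogouPonta_alt tabuleiro jogou pontas i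
instance (tabuleiro : List String) (jogou : Bool) (pontas : List Int) (i : Int) (out : Bool) : Decidable (Spec_jogouPonta tabuleiro jogou pontas i out) := by unfold Spec_jogouPonta; infer_instance

-- ===== CLAIM (what is proved, stated in full; the proofs are below) =====
def Claim_equal_jogouPonta : Prop := ∀ (tabuleiro : List String) (jogou : Bool) (pontas : List Int) (i : Int), Dom_jogouPonta tabuleiro jogou pontas i → Pre_jogouPonta tabuleiro jogou pontas i → Spec_jogouPonta tabuleiro jogou pontas i (jogouPonta tabuleiro jogou pontas i)

-- ===== LEMMAS AND PROOFS =====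

theorem jogouPonta_eq_alt (tabuleiro : List String) (pontas : List Int) :
    ∀ (n : Nat) (i : Int) (jogou : Bool), ((tabuleiro.length : Int) - i).toNat = n →
      -(tabuleiro.length : Int) ≤ i →
      jogouPonta tabuleiro jogou pontas i = jogouPonta_alt tabuleiro jogou pontas i := by
  intro n
  induction n with
  | zero =>
    intro i jogou hn hpre
    have hge : (tabuleiro.length : Int) ≤ i := by omega
    rw [jogouPonta, jogouPonta_alt, PySem.List.pyRange_one_eq_nil hge]
    simp [not_lt.mpr hge]
  | succ m ih =>
    intro i jogou hn hpre
    have hlt : i < (tabuleiro.length : Int) := by omega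
    obtain ⟨c, hc⟩ : ∃ c, PySem.List.pyGet? tabuleiro i = some c := by
      cases h' : PySem.List.pyGet? tabuleiro i with
      | some c => exact ⟨c, rfl⟩
      | none =>
        exfalso
        rw [PySem.List.pyGet?_eq_none_iff] at h'
        exact h' (by simp [PySem.Raise.InRange]; omega)
    rw [jogouPonta, jogouPonta_alt, PySem.List.pyRange_one_cons hlt, List.foldl_cons]
    have halt : ∀ acc : Bool, jogouPonta_alt tabuleiro acc pontas (i+1) =
        (PySem.List.pyRange (i+1) (tabuleiro.length : Int) 1).foldl
          (fun acc j =>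
            match PySem.List.pyGet? tabuleiro j with
            | none => acc
            | some c => if c != " " && pontas.contains j then true else acc) acc := by
      intro acc; rw [jogouPonta_alt]
    simp only [hc, dif_pos hlt]
    by_cases h1 : c = " "
    · subst h1
      simp only [bne_self_eq_false, Bool.false_and, Bool.false_eq_true, if_false]
      rw [ih (i+1) jogou (by omega) (by omega), halt]
      first | rw [if_pos trivial] | skip
    · have hb : (c != " ") = true := by simp [bne, h1]
      by_cases h2 : pontas.contains i
      · simp only [hb, h2, Bool.true_and, if_true]
        rw [ih (i+1) true (by omega) (by omega), halt]
        first | rw [if_pos trivial, if_pos trivial] | rw [if_pos trivial] | skip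
      · have h2' : pontas.contains i = false := by simp_all
        simp only [hb, h2', Bool.true_and, Bool.false_eq_true, if_false]
        rw [ih (i+1) jogou (by omega) (by omega), halt]
        first | rw [if_pos trivial, if_pos trivial] | rw [if_pos trivial] | skip

-- ===== VERDICT (by name: the statement is the Claim_ definition above) =====
theorem jogouPonta_spec : Claim_equal_jogouPonta := by
  intro tabuleiro jogou pontas i _ hpre
  exact jogouPonta_eq_alt tabuleiro pontas _ i jogou rfl hpre
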